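-- pv_equiv track=rewrite | github.com/Precision577/VPN-Docking-System-with-Squid-Proxy-and-Real-Time-Dashboard | update_vpn_info.py | group_nodes_by_vpn_file
-- ===== SOURCE A (Python) =====
-- def group_nodes_by_vpn_file(rows):
--     """
--     Group VPN nodes based on their VPN file, ensuring UDP and TCP pairs are listed together,
--     and prioritize vpn_node_1, vpn_node_2, vpn_node_3, vpn_node_4, etc. Ensure Public IP stays with the correct node.
--     """
--     vpn_file_map = {}
--     header = rows[0]
--
--     # Map each row based on its VPN file (normalize the VPN file name by removing '-tcp' and '-udp')
--     for row in rows[1:]: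
--         vpn_file_base = row[2].replace('-tcp', '').replace('-udp', '')  # VPN file is in column 3 (index 2)
--         if vpn_file_base not in vpn_file_map:
--             vpn_file_map[vpn_file_base] = []
--         vpn_file_map[vpn_file_base].append(row)
--
--     # Sort nodes within each VPN file group by node number to ensure correct order and Public IP alignment
--     grouped_rows = []
--     for vpn_file_base, node_group in vpn_file_map.items():
--         sorted_group = sorted(node_group, key=lambda row: int(row[0].split('_')[-1]))
--         grouped_rows.extend(sorted_group)
--
--     # Return rows with the header and the grouped, sorted body
--     return [header] + grouped_rows
-- ===== SOURCE B (Python) =====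
-- def group_nodes_by_vpn_file(rows):
--     """
--     Same result as the original: header row first, then the body rows grouped by
--     normalized VPN file (first-appearance order) and sorted by node number within
--     each group — produced here by ONE stable flat sort of the body with a
--     composite key (first-appearance index of the base name, node number).
--     """
--     header = rows[0]
--     body = rows[1:]
--     order = {}
--     for row in body:
--         base = row[2].replace('-tcp', '').replace('-udp', '')
--         order.setdefault(base, len(order))
--     return [header] + sorted(
--         body,
--         key=lambda row: (order[row[2].replace('-tcp', '').replace('-udp', '')],
--                          int(row[0].split('_')[-1])),
--     )
-- ===== Notes on version B (the rewrite author's own statement) =====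
-- stated objective: alternative
-- what changed: A buckets body rows into a dict keyed by the normalized base name and concatenates per-bucket sorts; B records each base's first-appearance index in one pass and then produces the body with a single stable flat sort keyed by (first-appearance index, node number).
-- outside the precondition, e.g. on group_nodes_by_vpn_file([]): A raises IndexError, B raises IndexError; on group_nodes_by_vpn_file([['h', 'i', 'f'], ['vpn_node_1', 'ip']]): A raises IndexError, B raises IndexError; on group_nodes_by_vpn_file([['h', 'i', 'f'], ['vpn_node_x', 'ip', 'us-tcp']]): A raises ValueError, B raises ValueError
import Mathlib
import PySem

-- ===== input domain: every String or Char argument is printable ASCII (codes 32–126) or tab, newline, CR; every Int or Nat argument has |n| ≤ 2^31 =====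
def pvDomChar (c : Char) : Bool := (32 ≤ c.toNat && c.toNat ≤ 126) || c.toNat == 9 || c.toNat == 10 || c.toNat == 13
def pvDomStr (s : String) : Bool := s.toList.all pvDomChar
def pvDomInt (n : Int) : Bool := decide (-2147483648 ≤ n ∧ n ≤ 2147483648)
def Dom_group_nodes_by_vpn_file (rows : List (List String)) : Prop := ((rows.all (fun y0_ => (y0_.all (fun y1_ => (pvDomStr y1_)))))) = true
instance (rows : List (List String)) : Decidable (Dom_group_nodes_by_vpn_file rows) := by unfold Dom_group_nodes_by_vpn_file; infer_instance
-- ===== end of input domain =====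

-- B replaces A's dict-of-buckets + per-group sort by one stable flat sort of the
-- body with a composite key (first-appearance index of the base name, node number);
-- objective: alternative (same cost class, different shape).

-- shared helpers: the two key computations both Pythons perform on a row
-- row[2].replace('-tcp', '').replace('-udp', '')
def pvBase (row : List String) : String :=
  PySem.Str.replace (PySem.Str.replace (PySem.List.pyGetD row 2 "") "-tcp" "") "-udp" ""

-- row[0].split('_')[-1]
def pvLastPiece (row : List String) : String :=
  PySem.List.pyGetD ((PySem.Str.split? (PySem.List.pyGetD row 0 "") "_").getD []) (-1) ""

-- int(row[0].split('_')[-1]); none = ValueError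
def pvNum? (row : List String) : Option Int := PySem.Int.ofStr? (pvLastPiece row)

def pvNum (row : List String) : Int := (pvNum? row).getD 0

-- ===== PORT A =====
def group_nodes_by_vpn_file (rows : List (List String)) : List (List String) :=
  let header := PySem.List.pyGetD rows 0 []
  let vpnFileMap : PySem.Dict String (List (List String)) :=
    rows.tail.foldl (fun d row => d.modify (pvBase row) [] (fun g => g ++ [row])) PySem.Dict.empty
  let groupedRows :=
    vpnFileMap.items.foldl (fun acc bg => acc ++ PySem.List.sorted bg.2 pvNum false) []
  [header] ++ groupedRows

-- ===== PORT B =====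
def group_nodes_by_vpn_file_alt (rows : List (List String)) : List (List String) :=
  let header := PySem.List.pyGetD rows 0 []
  let body := rows.tail
  let order : PySem.Dict String Int :=
    body.foldl (fun d row => d.setdefault (pvBase row) (d.size : Int)) PySem.Dict.empty
  [header] ++ PySem.List.sorted2 body (fun row => order.getD (pvBase row) 0) pvNum false

-- ===== PRECONDITION & SPEC =====
-- Pre_ excludes exactly the inputs on which the Python A raises: an empty rows list
-- (IndexError on rows[0]), a body row shorter than 3 columns (IndexError on row[2]),
-- and a body row whose row[0].split('_')[-1] is not int-parsable (ValueError).
def Pre_group_nodes_by_vpn_file (rows : List (List String)) : Prop :=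
  rows ≠ [] ∧ ∀ row ∈ rows.tail, 3 ≤ row.length ∧ (pvNum? row).isSome
instance (rows : List (List String)) : Decidable (Pre_group_nodes_by_vpn_file rows) := by unfold Pre_group_nodes_by_vpn_file; infer_instance

def pvWitness_group_nodes_by_vpn_file : List (List String) :=
  [["Node", "IP", "File"],
   ["vpn_node_2", "10.0.0.2", "us-tcp"],
   ["vpn_node_1", "10.0.0.1", "us-udp"],
   ["vpn_node_1", "10.0.1.1", "eu-tcp"]]

def Spec_group_nodes_by_vpn_file (rows : List (List String)) (out : List (List String)) : Prop := out = group_nodes_by_vpn_file_alt rows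
instance (rows : List (List String)) (out : List (List String)) : Decidable (Spec_group_nodes_by_vpn_file rows out) := by unfold Spec_group_nodes_by_vpn_file; infer_instance

-- ===== CLAIM (what is proved, stated in full; the proofs are below) =====
def Claim_equal_group_nodes_by_vpn_file : Prop := ∀ (rows : List (List String)), Dom_group_nodes_by_vpn_file rows → Pre_group_nodes_by_vpn_file rows → Spec_group_nodes_by_vpn_file rows (group_nodes_by_vpn_file rows)

-- ===== LEMMAS AND PROOFS =====

-- the first-appearance list of base names of a body
def pvBases (body : List (List String)) : List String :=
  PySem.Set.ofList (body.map pvBase)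

-- insertBy walks past a prefix none of whose elements x goes before
theorem pv_insertBy_append_not_before {α : Type} (before : α → α → Bool) (x : α)
    (ys zs : List α) (h : ∀ y ∈ ys, before x y = false) :
    PySem.List.insertBy before x (ys ++ zs) = ys ++ PySem.List.insertBy before x zs := by
  induction ys with
  | nil => simp
  | cons y t ih =>
    simp only [List.cons_append, PySem.List.insertBy, h y (by simp)]
    simp only [Bool.false_eq_true, if_false, List.cons.injEq, true_and]
    exact ih (fun z hz => h z (by simp [hz]))

-- insertBy stops before a suffix all of whose elements x goes before
theorem pv_insertBy_append_before {α : Type} (before : α → α → Bool) (x : α)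
    (ys zs : List α) (h : ∀ z ∈ zs, before x z = true) :
    PySem.List.insertBy before x (ys ++ zs) = PySem.List.insertBy before x ys ++ zs := by
  induction ys with
  | nil =>
    cases zs with
    | nil => rfl
    | cons z t => simp [PySem.List.insertBy, h z (by simp)]
  | cons y t ih =>
    by_cases hb : before x y = true
    · simp [PySem.List.insertBy, hb]
    · simp only [Bool.not_eq_true] at hb
      simp [PySem.List.insertBy, hb, ih]

-- insertBy only compares x with members of the list
theorem pv_insertBy_congr {α : Type} (before before' : α → α → Bool) (x : α)
    (ys : List α) (h : ∀ y ∈ ys, before x y = before' x y) :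
    PySem.List.insertBy before x ys = PySem.List.insertBy before' x ys := by
  induction ys with
  | nil => rfl
  | cons y t ih =>
    simp only [PySem.List.insertBy, h y (by simp)]
    by_cases hb : before' x y = true
    · simp [hb]
    · simp only [Bool.not_eq_true] at hb
      simp only [hb, Bool.false_eq_true, if_false, List.cons.injEq, true_and]
      exact ih (fun z hz => h z (by simp [hz]))

-- sorted2 / sorted are left folds of insertBy: peel the last element
theorem pv_sorted2_append_one {α : Type} (l : List α) (r : α)
    (k1 : α → Int) (k2 : α → Int) :
    PySem.List.sorted2 (l ++ [r]) k1 k2 false =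
      PySem.List.insertBy
        (fun a b => decide (k1 a < k1 b) || (!decide (k1 b < k1 a) && decide (k2 a < k2 b)))
        r (PySem.List.sorted2 l k1 k2 false) := by
  simp [PySem.List.sorted2, List.foldl_append]

theorem pv_sorted_append_one {α : Type} (l : List α) (r : α) (k : α → Int) :
    PySem.List.sorted (l ++ [r]) k false =
      PySem.List.insertBy (fun a b => decide (k a < k b)) r (PySem.List.sorted l k false) := by
  simp [PySem.List.sorted, List.foldl_append]

-- the key of sorted2 only matters on the list's members
theorem pv_sorted2_congr {α : Type} (l : List α) (k1 k1' k2 : α → Int)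
    (h : ∀ r ∈ l, k1 r = k1' r) :
    PySem.List.sorted2 l k1 k2 false = PySem.List.sorted2 l k1' k2 false := by
  induction l using List.reverseRecOn with
  | nil => rfl
  | append_singleton l r ih =>
    rw [pv_sorted2_append_one, pv_sorted2_append_one,
        ih (fun y hy => h y (by simp [hy]))]
    apply pv_insertBy_congr
    intro y hy
    have hyl : y ∈ l := (PySem.List.sorted2_perm l k1' k2 false).mem_iff.mp hy
    rw [h r (by simp), h y (by simp [hyl])]

-- MAIN: a stable flat sort by (index of the base in a duplicate-free list of bases, num)
-- equals the concatenation, base by base, of the per-base stable sorts by num.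
theorem pv_sorted2_eq_flatMap {α : Type} (b : α → String) (n : α → Int)
    (l : List α) (B : List String) (hB : B.Nodup) (hmem : ∀ r ∈ l, b r ∈ B) :
    PySem.List.sorted2 l (fun r => ((B.idxOf (b r) : Nat) : Int)) n false =
      B.flatMap (fun c => PySem.List.sorted (l.filter (fun r => b r == c)) n false) := by
  induction l using List.reverseRecOn with
  | nil => simp [PySem.List.sorted2, PySem.List.sorted]
  | append_singleton l r ih =>
    rw [pv_sorted2_append_one, ih (fun y hy => hmem y (by simp [hy]))]
    obtain ⟨B1, B2, hsplit⟩ := List.append_of_mem (hmem r (by simp))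
    subst hsplit
    have hdisj := List.disjoint_of_nodup_append hB
    have hnd1 : b r ∉ B1 := fun hc => hdisj hc (by simp)
    have hnd2 : b r ∉ B2 := by
      have h2 := hB.of_append_right
      simp only [List.nodup_cons] at h2
      exact h2.1
    have hidx0 : (B1 ++ b r :: B2).idxOf (b r) = B1.length := by
      rw [List.idxOf_append_of_notMem hnd1, List.idxOf_cons_self]
      simp
    -- a row of the c-bucket has base c
    have hbucket : ∀ (c : String) (y : α),
        y ∈ PySem.List.sorted (l.filter (fun s => b s == c)) n false → b y = c := by
      intro c y hy
      have hy' : y ∈ l.filter (fun s => b s == c) :=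
        (PySem.List.sorted_perm (l.filter (fun s => b s == c)) n false).mem_iff.mp hy
      exact eq_of_beq (List.mem_filter.mp hy').2
    -- split the flat list at the (b r)-bucket
    rw [List.flatMap_append, List.flatMap_cons]
    rw [pv_insertBy_append_not_before _ r _ _ (by
      intro y hy
      obtain ⟨c, hc, hyy⟩ := List.mem_flatMap.mp hy
      have hby : b y = c := hbucket c y hyy
      have hltn : (B1 ++ b r :: B2).idxOf (b y) < B1.length := by
        rw [hby, List.idxOf_append_of_mem hc]
        exact List.idxOf_lt_length_of_mem hc
      have hA : ¬ ((((B1 ++ b r :: B2).idxOf (b r) : Nat) : Int) <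
          (((B1 ++ b r :: B2).idxOf (b y) : Nat) : Int)) := by
        rw [hidx0]; omega
      have hBlt : ((((B1 ++ b r :: B2).idxOf (b y) : Nat) : Int) <
          (((B1 ++ b r :: B2).idxOf (b r) : Nat) : Int)) := by
        rw [hidx0]; exact_mod_cast hltn
      simp [hA, hBlt])]
    rw [pv_insertBy_append_before _ r _ _ (by
      intro z hz
      obtain ⟨c, hc, hzz⟩ := List.mem_flatMap.mp hz
      have hbz : b z = c := hbucket c z hzz
      have hc1 : b z ∉ B1 := fun hcc => hdisj hcc (by simp [hbz ▸ hc])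
      have hcne : b r ≠ b z := fun hcc => hnd2 (by rw [hcc, hbz]; exact hbz ▸ hc)
      have hgt : B1.length < (B1 ++ b r :: B2).idxOf (b z) := by
        rw [List.idxOf_append_of_notMem hc1, List.idxOf_cons_ne _ (by simpa using hcne)]
        omega
      have hAlt : ((((B1 ++ b r :: B2).idxOf (b r) : Nat) : Int) <
          (((B1 ++ b r :: B2).idxOf (b z) : Nat) : Int)) := by
        rw [hidx0]; exact_mod_cast hgt
      simp [hAlt])]
    rw [pv_insertBy_congr _ (fun a c => decide (n a < n c)) r _ (by
      intro y hy
      have hby : b y = b r := hbucket (b r) y hy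
      rw [hby]
      simp)]
    rw [← pv_sorted_append_one]
    -- rewrite the filtered pieces for l ++ [r]
    have hfilter_ne : ∀ c : String, b r ≠ c →
        (l ++ [r]).filter (fun s => b s == c) = l.filter (fun s => b s == c) := by
      intro c hne
      rw [List.filter_append]
      have hf : (fun s => b s == c) r = false := beq_false_of_ne hne
      simp [hf]
    have hfilter_eq : (l ++ [r]).filter (fun s => b s == b r) =
        l.filter (fun s => b s == b r) ++ [r] := by
      rw [List.filter_append]
      simp
    have h1 : B1.flatMap (fun c =>
        PySem.List.sorted ((l ++ [r]).filter (fun s => b s == c)) n false) =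
        B1.flatMap (fun c => PySem.List.sorted (l.filter (fun s => b s == c)) n false) :=
      List.flatMap_congr (fun c hc => by rw [hfilter_ne c (fun hcc => hnd1 (hcc ▸ hc))])
    have h2 : B2.flatMap (fun c =>
        PySem.List.sorted ((l ++ [r]).filter (fun s => b s == c)) n false) =
        B2.flatMap (fun c => PySem.List.sorted (l.filter (fun s => b s == c)) n false) :=
      List.flatMap_congr (fun c hc => by rw [hfilter_ne c (fun hcc => hnd2 (hcc ▸ hc))])
    rw [List.flatMap_append, List.flatMap_cons, h1, h2, hfilter_eq]

-- A-side: the keys of the grouping dict are the first-appearance bases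
theorem pv_A_keys (l : List (List String)) (d : PySem.Dict String (List (List String))) :
    (l.foldl (fun d row => d.modify (pvBase row) [] (fun g => g ++ [row])) d).keys =
      PySem.Set.update d.keys (l.map pvBase) := by
  induction l generalizing d with
  | nil => simp [PySem.Set.update]
  | cons r t ih =>
    simp only [List.foldl_cons, List.map_cons]
    rw [ih]
    have hstep : (d.modify (pvBase r) [] (fun g => g ++ [r])).keys =
        PySem.Set.add d.keys (pvBase r) := by
      rw [PySem.Dict.keys_modify]
      by_cases hc : d.contains (pvBase r) = true
      · rw [PySem.Dict.keys_insert_of_contains d _ hc]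
        simp only [PySem.Set.add, PySem.Set.contains]
        rw [if_pos (by
          rw [List.contains_iff_mem]
          exact (PySem.Dict.contains_iff_mem_keys d _).mp hc)]
      · rw [PySem.Dict.keys_insert_of_not_contains d _ (by
          simpa using hc)]
        simp only [PySem.Set.add, PySem.Set.contains]
        rw [if_neg (by
          rw [List.contains_iff_mem]
          intro hm
          exact hc ((PySem.Dict.contains_iff_mem_keys d _).mpr hm))]
    rw [hstep]
    simp [PySem.Set.update]

-- A-side: the bucket stored under base c is the c-filter of the body
theorem pv_A_bucket (l : List (List String)) (c : String) :
    ((l.foldl (fun d row => d.modify (pvBase row) [] (fun g => g ++ [row]))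
        PySem.Dict.empty).getD c []) = l.filter (fun r => pvBase r == c) := by
  have h := PySem.Dict.getD_foldl_modify_append
    (l.map (fun r => (pvBase r, r))) (PySem.Dict.empty) c
  rw [List.foldl_map] at h
  simp only [List.filter_map, List.map_map] at h
  rw [h]
  simp [PySem.Dict.getD, PySem.Dict.get?, PySem.Dict.empty, Function.comp_def]

-- A equals the canonical grouped form
theorem pv_A_canon (rows : List (List String)) :
    group_nodes_by_vpn_file rows =
      [PySem.List.pyGetD rows 0 []] ++
        (pvBases rows.tail).flatMap
          (fun c => PySem.List.sorted (rows.tail.filter (fun r => pvBase r == c)) pvNum false) := by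
  unfold group_nodes_by_vpn_file
  simp only
  congr 1
  set d := rows.tail.foldl (fun d row => d.modify (pvBase row) [] (fun g => g ++ [row]))
    PySem.Dict.empty with hd
  have hkeys : d.keys = pvBases rows.tail := by
    rw [hd, pv_A_keys]
    simp only [PySem.Dict.keys_empty]
    rfl
  have hnd : d.keys.Nodup := by
    rw [hkeys]
    exact PySem.Set.nodup_ofList _
  rw [PySem.List.foldl_append_eq_flatMap, List.nil_append,
      PySem.Dict.items_eq_map_keys d hnd [], List.flatMap_map, hkeys]
  apply List.flatMap_congr
  intro c _
  rw [hd, pv_A_bucket]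

-- B-side: the order dict is the enumeration of the first-appearance bases
theorem pv_B_order (l : List (List String)) (B0 : List String) :
    (l.foldl (fun d row => d.setdefault (pvBase row) (d.size : Int))
        (PySem.Dict.mk (B0.zipIdx.map (fun p => (p.1, (p.2 : Int)))))) =
      PySem.Dict.mk ((PySem.Set.update B0 (l.map pvBase)).zipIdx.map (fun p => (p.1, (p.2 : Int)))) := by
  induction l generalizing B0 with
  | nil => simp [PySem.Set.update]
  | cons r t ih =>
    simp only [List.foldl_cons, List.map_cons]
    have hkeysB : ∀ (B : List String),
        (PySem.Dict.mk (B.zipIdx.map (fun p => (p.1, (p.2 : Int))))).contains (pvBase r) =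
          B.contains (pvBase r) := by
      intro B
      by_cases hm : pvBase r ∈ B
      · rw [(PySem.Dict.contains_iff_mem_keys _ _).mpr (by
          simp only [PySem.Dict.keys_mk, List.map_map]
          simpa [Function.comp_def, List.zipIdx_map_fst] using hm)]
        exact (Eq.comm.mpr (by exact List.contains_iff_mem.mpr hm))
      · rw [Bool.eq_iff_iff]
        constructor
        · intro hc
          exact absurd (by
            have := (PySem.Dict.contains_iff_mem_keys _ _).mp hc
            simpa [PySem.Dict.keys_mk, List.map_map, Function.comp_def,
              List.zipIdx_map_fst] using this) hm
        · intro hc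
          exact absurd (List.contains_iff_mem.mp hc) hm
    by_cases hc : pvBase r ∈ B0
    · rw [show (PySem.Dict.mk (B0.zipIdx.map (fun p => (p.1, (p.2 : Int))))).setdefault
          (pvBase r) _ = PySem.Dict.mk (B0.zipIdx.map (fun p => (p.1, (p.2 : Int)))) from by
        apply PySem.Dict.setdefault_of_contains
        rw [hkeysB, List.contains_iff_mem]; exact hc]
      rw [ih]
      simp only [PySem.Set.update, List.foldl_cons]
      congr 2
      simp only [PySem.Set.add, PySem.Set.contains]
      rw [if_pos (by rw [List.contains_iff_mem]; exact hc)]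
    · rw [show (PySem.Dict.mk (B0.zipIdx.map (fun p => (p.1, (p.2 : Int))))).setdefault
          (pvBase r) ((PySem.Dict.mk (B0.zipIdx.map (fun p => (p.1, (p.2 : Int))))).size : Int) =
          PySem.Dict.mk ((B0 ++ [pvBase r]).zipIdx.map (fun p => (p.1, (p.2 : Int)))) from by
        simp only [PySem.Dict.setdefault]
        rw [if_neg (by rw [hkeysB]; simp [hc])]
        congr 1
        rw [List.zipIdx_append]
        simp [PySem.Dict.size]]
      rw [ih]
      simp only [PySem.Set.update, List.foldl_cons]
      congr 2
      simp only [PySem.Set.add, PySem.Set.contains]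
      rw [if_neg (by rw [List.contains_iff_mem]; exact hc)]

-- lookup in the enumeration dict is the index in the base list
theorem pv_enum_getD (B : List String) (k : Nat) (c : String) (hc : c ∈ B) :
    (PySem.Dict.mk ((B.zipIdx k).map (fun p => (p.1, (p.2 : Int))))).getD c 0 =
      ((k + B.idxOf c : Nat) : Int) := by
  induction B generalizing k with
  | nil => cases hc
  | cons x B' ih =>
    rw [List.zipIdx_cons]
    simp only [List.map_cons]
    by_cases hx : x = c
    · rw [PySem.Dict.getD, PySem.Dict.get?_mk_cons]
      rw [if_pos (by simp [hx])]
      simp [hx, List.idxOf_cons_self]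
    · rw [PySem.Dict.getD, PySem.Dict.get?_mk_cons]
      rw [if_neg (by simp [hx])]
      have hc' : c ∈ B' := by
        cases hc with
        | head => exact absurd rfl hx
        | tail _ h => exact h
      have := ih (k + 1) hc'
      rw [PySem.Dict.getD] at this
      rw [this, List.idxOf_cons_ne _ (by simpa using hx)]
      push_cast
      ring

-- B equals the canonical grouped form
theorem pv_B_canon (rows : List (List String)) :
    group_nodes_by_vpn_file_alt rows =
      [PySem.List.pyGetD rows 0 []] ++
        (pvBases rows.tail).flatMap
          (fun c => PySem.List.sorted (rows.tail.filter (fun r => pvBase r == c)) pvNum false) := by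
  unfold group_nodes_by_vpn_file_alt
  simp only
  congr 1
  have horder : rows.tail.foldl (fun d row => d.setdefault (pvBase row) (d.size : Int))
      PySem.Dict.empty =
      PySem.Dict.mk ((pvBases rows.tail).zipIdx.map (fun p => (p.1, (p.2 : Int)))) := by
    have := pv_B_order rows.tail []
    simpa [PySem.Dict.empty, pvBases, PySem.Set.ofList, PySem.Set.update, PySem.Set.empty]
      using this
  rw [horder]
  have hkey : ∀ row ∈ rows.tail,
      (PySem.Dict.mk ((pvBases rows.tail).zipIdx.map (fun p => (p.1, (p.2 : Int))))).getD
          (pvBase row) 0 =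
        (((pvBases rows.tail).idxOf (pvBase row) : Nat) : Int) := by
    intro row hrow
    have hmem : pvBase row ∈ pvBases rows.tail := by
      unfold pvBases
      rw [PySem.Set.mem_ofList]
      exact List.mem_map_of_mem hrow
    have := pv_enum_getD (pvBases rows.tail) 0 (pvBase row) hmem
    simpa using this
  rw [pv_sorted2_congr _ _ (fun row => (((pvBases rows.tail).idxOf (pvBase row) : Nat) : Int))
    pvNum hkey]
  exact pv_sorted2_eq_flatMap pvBase pvNum rows.tail (pvBases rows.tail)
    (PySem.Set.nodup_ofList _)
    (fun r hr => by
      unfold pvBases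
      rw [PySem.Set.mem_ofList]
      exact List.mem_map_of_mem hr)

-- ===== VERDICT (by name: the statement is the Claim_ definition above) =====
theorem group_nodes_by_vpn_file_spec : Claim_equal_group_nodes_by_vpn_file := by
  intro rows _ _
  unfold Spec_group_nodes_by_vpn_file
  rw [pv_A_canon, pv_B_canon]
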